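-- pv_equiv track=rewrite | github.com/burning-calamity/extirpation | online/caesar_box.py | caesar_box_decrypt
-- ===== SOURCE A (Python) =====
-- def caesar_box_decrypt(ciphertext: str, size: int = 4) -> str:
--     if size < 2:
--         raise ValueError('size must be >= 2')
--     rows = (len(ciphertext) + size - 1) // size
--     padded = ciphertext.ljust(rows * size, 'X')
--     grid = [[''] * size for _ in range(rows)]
--     idx = 0
--     for c in range(size):
--         for r in range(rows):
--             grid[r][c] = padded[idx]
--             idx += 1
--     return ''.join(''.join(row) for row in grid).rstrip('X')
-- ===== SOURCE B (Python) =====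
-- def caesar_box_decrypt(ciphertext: str, size: int = 4) -> str:
--     if size < 2:
--         raise ValueError('size must be >= 2')
--     rows = (len(ciphertext) + size - 1) // size
--     padded = ciphertext.ljust(rows * size, 'X')
--     columns = [padded[c * rows:(c + 1) * rows] for c in range(size)]
--     return ''.join(''.join(t) for t in zip(*columns)).rstrip('X')
-- ===== Notes on version B (the rewrite author's own statement) =====
-- stated objective: idiomatic
-- what changed: Replaces the mutable 2D grid populated column-major with an index counter by slicing the padded string into column strings and transposing them with zip(*columns), joining the rows directly.
import Mathlib
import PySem

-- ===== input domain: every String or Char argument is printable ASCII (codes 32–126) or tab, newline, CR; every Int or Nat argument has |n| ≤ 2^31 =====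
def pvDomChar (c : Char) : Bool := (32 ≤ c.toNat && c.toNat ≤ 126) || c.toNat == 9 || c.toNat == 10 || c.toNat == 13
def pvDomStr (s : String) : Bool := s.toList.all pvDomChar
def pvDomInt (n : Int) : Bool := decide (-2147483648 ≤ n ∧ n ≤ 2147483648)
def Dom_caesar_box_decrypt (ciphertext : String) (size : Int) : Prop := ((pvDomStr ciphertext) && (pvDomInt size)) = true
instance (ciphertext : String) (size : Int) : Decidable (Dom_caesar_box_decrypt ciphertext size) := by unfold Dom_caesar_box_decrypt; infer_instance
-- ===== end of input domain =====

-- B replaces A's mutable 2D grid filled column-major with column slices of the padded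
-- string transposed by zip; size < 2 (where A raises ValueError) is outside Pre_.
-- Python lists/strings have O(1) indexing and O(length) slicing, so the grid and the
-- padded buffer are ported as Array (same values; honest evaluation cost).

-- ===== PORT A =====
-- shared by both ports: exact port of Python's s.rstrip('X') on the character list
def rstripX (cs : List Char) : List Char := (cs.reverse.dropWhile (· == 'X')).reverse

-- inner `for r in range(rows)` loop of A: state is (grid, idx); cells are strings = List Char
def aInner (padded : Array Char) (c rows : Nat) (st : Array (Array (List Char)) × Nat) :
    Array (Array (List Char)) × Nat :=
  (List.range rows).foldl
    (fun st r =>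
      (st.1.modify r (fun row => row.setIfInBounds c [padded.getD st.2 'X']), st.2 + 1)) st

def caesar_box_decrypt (ciphertext : String) (size : Int) : String :=
  if size < 2 then ""   -- Python raises ValueError here; excluded by Pre_
  else
    let sz := size.toNat
    let cs := ciphertext.toList
    let rows := (cs.length + sz - 1) / sz
    let padded := (cs ++ List.replicate (rows * sz - cs.length) 'X').toArray   -- ljust(rows*size, 'X')
    let fin := (List.range sz).foldl (fun st c => aInner padded c rows st)
      (Array.replicate rows (Array.replicate sz ([] : List Char)), 0)
    String.ofList (rstripX ((fin.1.toList.map (fun row => row.toList.flatten)).flatten))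

-- ===== PORT B =====
-- zip(*cols): take heads while no list is exhausted (Python zip truncates at the shortest)
def zipCols (cols : List (List Char)) : List (List Char) :=
  if h : cols = [] ∨ cols.any List.isEmpty then []
  else (cols.map (fun l => l.headD 'X')) :: zipCols (cols.map List.tail)
termination_by (cols.headD []).length
decreasing_by
  cases cols with
  | nil => exact absurd (Or.inl rfl) h
  | cons hd tl =>
    cases hd with
    | nil => exact absurd (Or.inr (by simp)) h
    | cons a as => simp

def caesar_box_decrypt_alt (ciphertext : String) (size : Int) : String :=
  if size < 2 then ""   -- ValueError in Python; outside Pre_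
  else
    let sz := size.toNat
    let cs := ciphertext.toList
    let rows := (cs.length + sz - 1) / sz
    let padded := (cs ++ List.replicate (rows * sz - cs.length) 'X').toArray
    -- padded[c*rows:(c+1)*rows] for c in range(size)
    let cols := (List.range sz).map (fun c => (padded.extract (c * rows) ((c + 1) * rows)).toList)
    String.ofList (rstripX (zipCols cols).flatten)

-- ===== PRECONDITION & SPEC =====
-- Pre_ excludes exactly size < 2, where A raises ValueError (and B raises the same).
def Pre_caesar_box_decrypt (ciphertext : String) (size : Int) : Prop := 2 ≤ size
instance (ciphertext : String) (size : Int) : Decidable (Pre_caesar_box_decrypt ciphertext size) := by unfold Pre_caesar_box_decrypt; infer_instance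

def pvWitness_caesar_box_decrypt : String × Int := ("HLOEL", 2)

def Spec_caesar_box_decrypt (ciphertext : String) (size : Int) (out : String) : Prop := out = caesar_box_decrypt_alt ciphertext size
instance (ciphertext : String) (size : Int) (out : String) : Decidable (Spec_caesar_box_decrypt ciphertext size out) := by unfold Spec_caesar_box_decrypt; infer_instance

-- ===== CLAIM (what is proved, stated in full; the proofs are below) =====
def Claim_equal_caesar_box_decrypt : Prop := ∀ (ciphertext : String) (size : Int), Dom_caesar_box_decrypt ciphertext size → Pre_caesar_box_decrypt ciphertext size → Spec_caesar_box_decrypt ciphertext size (caesar_box_decrypt ciphertext size)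

-- ===== LEMMAS AND PROOFS =====

-- the row-major reading both programs produce before rstrip: char (r,c) is padded[c*rows+r]
def target (padded : Array Char) (rows sz : Nat) : List Char :=
  ((List.range rows).map (fun r =>
    (List.range sz).map (fun c => padded.getD (c * rows + r) 'X'))).flatten

lemma arr_getD (a : Array Char) (i : Nat) (d : Char) : a.getD i d = a.toList.getD i d := by
  unfold Array.getD
  split
  · rename_i hlt
    rw [List.getD_eq_getElem?_getD, List.getElem?_eq_getElem (by simpa using hlt)]
    simp
  · rename_i hge
    rw [List.getD_eq_getElem?_getD, List.getElem?_eq_none (by simpa using hge)]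
    simp

lemma map_modify {A B : Type} (t : A → B) (l : List A) (i : Nat) (f : A → A) (g : B → B)
    (h : ∀ x, t (f x) = g (t x)) : (l.modify i f).map t = (l.map t).modify i g := by
  apply List.ext_getElem
  · simp
  · intro j h1 h2
    simp only [List.length_map, List.length_modify] at h1 h2
    rw [List.getElem_map, List.getElem_modify, List.getElem_modify, List.getElem_map]
    by_cases hij : i = j
    · simp [hij, h]
    · simp [hij]

lemma aInner_eq (padded : Array Char) (c n : Nat) (g : Array (Array (List Char))) (i0 : Nat) :
    (aInner padded c n (g, i0)).1.toList.map Array.toList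
        = (g.toList.map Array.toList).mapIdx
            (fun r row => if r < n then row.set c [padded.getD (i0 + r) 'X'] else row)
      ∧ (aInner padded c n (g, i0)).2 = i0 + n := by
  induction n generalizing g i0 with
  | zero =>
    unfold aInner
    simp only [List.range_zero, List.foldl_nil, Nat.add_zero]
    refine ⟨?_, by trivial⟩
    apply List.ext_getElem
    · simp
    · intro i h1 h2
      simp
  | succ n ih =>
    have hstep : aInner padded c (n + 1) (g, i0)
        = ((aInner padded c n (g, i0)).1.modify n
             (fun row => row.setIfInBounds c [padded.getD ((aInner padded c n (g, i0)).2) 'X']),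
           (aInner padded c n (g, i0)).2 + 1) := by
      unfold aInner
      rw [List.range_succ, List.foldl_append]
      simp
    obtain ⟨ih1, ih2⟩ := ih g i0
    rw [hstep, ih2]
    refine ⟨?_, by omega⟩
    rw [Array.toList_modify,
        map_modify Array.toList _ n _ (fun row => row.set c [padded.getD (i0 + n) 'X'])
          (fun x => Array.toList_setIfInBounds),
        ih1]
    apply List.ext_getElem
    · simp
    · intro i h1 h2
      simp only [List.length_modify, List.length_mapIdx] at h1 h2
      rw [List.getElem_modify, List.getElem_mapIdx, List.getElem_mapIdx]
      rcases Nat.lt_trichotomy i n with hlt | heq | hgt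
      · have e1 : ¬ n = i := by omega
        have e2 : i < n + 1 := by omega
        simp [e1, hlt, e2]
      · subst heq
        simp
      · have e1 : ¬ n = i := by omega
        have e2 : ¬ i < n := by omega
        have e3 : ¬ i < n + 1 := by omega
        simp [e1, e2, e3]

lemma aFold_eq (padded : Array Char) (rows sz : Nat) (k : Nat) (hk : k ≤ sz) :
    (((List.range k).foldl (fun st c => aInner padded c rows st)
        (Array.replicate rows (Array.replicate sz ([] : List Char)), 0)).1.toList.map
          Array.toList
      = (List.range rows).map (fun r =>
          (List.range sz).map (fun c =>
            if c < k then [padded.getD (c * rows + r) 'X'] else ([] : List Char))))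
    ∧ ((List.range k).foldl (fun st c => aInner padded c rows st)
        (Array.replicate rows (Array.replicate sz ([] : List Char)), 0)).2 = k * rows := by
  induction k with
  | zero =>
    simp only [List.range_zero, List.foldl_nil, Nat.zero_mul]
    refine ⟨?_, by trivial⟩
    rw [Array.toList_replicate]
    apply List.ext_getElem
    · simp
    · intro i h1 h2
      simp [Array.toList_replicate]
  | succ k ih =>
    have hk' : k ≤ sz := by omega
    obtain ⟨ih1, ih2⟩ := ih hk'
    rw [List.range_succ, List.foldl_append]
    simp only [List.foldl_cons, List.foldl_nil]
    rcases hP : (List.range k).foldl (fun st c => aInner padded c rows st)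
        (Array.replicate rows (Array.replicate sz ([] : List Char)), 0) with ⟨g', i'⟩
    rw [hP] at ih1 ih2
    simp only at ih1 ih2
    obtain ⟨h1, h2⟩ := aInner_eq padded k rows g' i'
    rw [h1, ih1, ih2] at *
    constructor
    · apply List.ext_getElem
      · simp
      · intro i hh1 hh2
        simp only [List.length_mapIdx, List.length_map, List.length_range] at hh1 hh2
        rw [List.getElem_mapIdx]
        simp only [List.getElem_map, List.getElem_range]
        rw [if_pos hh2]
        apply List.ext_getElem
        · simp
        · intro j j1 j2
          simp only [List.length_set, List.length_map, List.length_range] at j1 j2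
          rw [List.getElem_set]
          simp only [List.getElem_map, List.getElem_range]
          rcases Nat.lt_trichotomy j k with hlt | heq | hgt
          · have e1 : ¬ k = j := by omega
            have e2 : j < k + 1 := by omega
            simp [e1, hlt, e2]
          · subst heq
            simp
          · have e1 : ¬ k = j := by omega
            have e2 : ¬ j < k := by omega
            have e3 : ¬ j < k + 1 := by omega
            simp [e1, e2, e3]
    · rw [h2, ih2]
      ring

lemma a_core (padded : Array Char) (rows sz : Nat) :
    (((List.range sz).foldl (fun st c => aInner padded c rows st)
        (Array.replicate rows (Array.replicate sz ([] : List Char)), 0)).1.toList.map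
      (fun row => row.toList.flatten)).flatten = target padded rows sz := by
  have hm : ((List.range sz).foldl (fun st c => aInner padded c rows st)
        (Array.replicate rows (Array.replicate sz ([] : List Char)), 0)).1.toList.map
      (fun row => row.toList.flatten)
      = (((List.range sz).foldl (fun st c => aInner padded c rows st)
        (Array.replicate rows (Array.replicate sz ([] : List Char)), 0)).1.toList.map
          Array.toList).map List.flatten := by
    rw [List.map_map]
    rfl
  rw [hm, (aFold_eq padded rows sz sz le_rfl).1]
  unfold target
  congr 1
  rw [List.map_map]
  apply List.map_congr_left
  intro r hr
  simp only [Function.comp_apply]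
  have : ((List.range sz).map (fun c =>
      if c < sz then [padded.getD (c * rows + r) 'X'] else ([] : List Char)))
      = (List.range sz).map (fun c => [padded.getD (c * rows + r) 'X']) := by
    apply List.map_congr_left
    intro c hc
    rw [if_pos (List.mem_range.mp hc)]
  rw [this]
  induction (List.range sz) with
  | nil => rfl
  | cons x xs ihx => simp_all

lemma getD_succ_tail (l : List Char) (r : Nat) (d : Char) :
    l.getD (r + 1) d = l.tail.getD r d := by
  cases l <;> simp [List.getD]

lemma zipCols_eq (n : Nat) : ∀ (cols : List (List Char)), cols ≠ [] →
    (∀ l ∈ cols, l.length = n) →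
    zipCols cols = (List.range n).map (fun r => cols.map (fun l => l.getD r 'X')) := by
  induction n with
  | zero =>
    intro cols hne hlen
    rw [zipCols]
    rw [dif_pos]
    · simp
    · right
      cases cols with
      | nil => exact absurd rfl hne
      | cons hd tl =>
        simp only [List.any_cons, Bool.or_eq_true]
        left
        have := hlen hd (List.mem_cons_self)
        simp [List.isEmpty_iff, List.length_eq_zero_iff.mp this]
  | succ n ih =>
    intro cols hne hlen
    rw [zipCols]
    rw [dif_neg]
    · have htl : (cols.map List.tail) ≠ [] := by
        cases cols with
        | nil => exact absurd rfl hne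
        | cons hd tl => simp
      have htlen : ∀ l ∈ cols.map List.tail, l.length = n := by
        intro l hl
        obtain ⟨l', hl', rfl⟩ := List.mem_map.mp hl
        have := hlen l' hl'
        simp [List.length_tail, this]
      rw [ih (cols.map List.tail) htl htlen]
      rw [List.range_succ_eq_map]
      simp only [List.map_cons, List.map_map]
      rw [List.cons.injEq]
      constructor
      · apply List.map_congr_left
        intro l hl
        have hlen0 : l.length = n + 1 := hlen l hl
        cases l with
        | nil => simp at hlen0
        | cons a as => simp [List.getD]
      · apply List.map_congr_left
        intro r _
        simp only [Function.comp_apply, List.map_map]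
        apply List.map_congr_left
        intro l _
        simp only [Function.comp_apply]
        exact (getD_succ_tail l r 'X').symm
    · rintro (rfl | hany)
      · exact hne rfl
      · obtain ⟨l, hl, hle⟩ := List.any_eq_true.mp hany
        have h1 := hlen l hl
        rw [List.isEmpty_iff.mp hle] at h1
        simp at h1

lemma b_core (padded : Array Char) (rows sz : Nat) (hsz : 1 ≤ sz)
    (hpl : padded.size = rows * sz) :
    (zipCols ((List.range sz).map (fun c =>
      (padded.extract (c * rows) ((c + 1) * rows)).toList))).flatten
      = target padded rows sz := by
  have hpl' : padded.toList.length = rows * sz := by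
    rw [Array.length_toList, hpl]
  have hcol : ∀ c : Nat,
      (padded.extract (c * rows) ((c + 1) * rows)).toList
        = (padded.toList.drop (c * rows)).take rows := by
    intro c
    rw [Array.toList_extract, List.extract_eq_drop_take,
        show (c + 1) * rows - c * rows = rows from by
          rw [Nat.succ_mul, Nat.add_sub_cancel_left]]
  have hcols : ((List.range sz).map (fun c =>
      (padded.extract (c * rows) ((c + 1) * rows)).toList))
      = (List.range sz).map (fun c => (padded.toList.drop (c * rows)).take rows) := by
    apply List.map_congr_left
    intro c _
    exact hcol c
  rw [hcols]
  have hne : (List.range sz).map (fun c => (padded.toList.drop (c * rows)).take rows) ≠ [] := by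
    simp [List.map_eq_nil_iff, List.range_eq_nil]
    omega
  have hlen : ∀ l ∈ (List.range sz).map (fun c => (padded.toList.drop (c * rows)).take rows),
      l.length = rows := by
    intro l hl
    obtain ⟨c, hc, rfl⟩ := List.mem_map.mp hl
    have hc' : c < sz := List.mem_range.mp hc
    simp only [List.length_take, List.length_drop, hpl']
    have : c * rows + rows ≤ rows * sz := by
      have h1 : (c + 1) * rows ≤ sz * rows := Nat.mul_le_mul_right rows (by omega)
      calc c * rows + rows = (c + 1) * rows := by ring
        _ ≤ sz * rows := h1
        _ = rows * sz := Nat.mul_comm _ _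
    omega
  rw [zipCols_eq rows _ hne hlen]
  unfold target
  congr 1
  apply List.map_congr_left
  intro r hr
  have hrr : r < rows := List.mem_range.mp hr
  rw [List.map_map]
  apply List.map_congr_left
  intro c hc
  have hcc : c < sz := List.mem_range.mp hc
  simp only [Function.comp_apply]
  rw [arr_getD]
  rw [List.getD_eq_getElem?_getD, List.getD_eq_getElem?_getD]
  rw [List.getElem?_take_of_lt hrr, List.getElem?_drop]

lemma len_le_rows_mul (L sz : Nat) (hsz : 0 < sz) : L ≤ ((L + sz - 1) / sz) * sz := by
  have h1 := Nat.div_add_mod (L + sz - 1) sz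
  have h2 := Nat.mod_lt (L + sz - 1) hsz
  have h3 : sz * ((L + sz - 1) / sz) = ((L + sz - 1) / sz) * sz := Nat.mul_comm _ _
  omega

-- ===== VERDICT (by name: the statement is the Claim_ definition above) =====
theorem caesar_box_decrypt_spec : Claim_equal_caesar_box_decrypt := by
  intro ciphertext size _ hpre
  unfold Pre_caesar_box_decrypt at hpre
  unfold Spec_caesar_box_decrypt
  unfold caesar_box_decrypt caesar_box_decrypt_alt
  have hlt : ¬ size < 2 := by omega
  rw [if_neg hlt, if_neg hlt]
  refine congrArg (fun l => String.ofList (rstripX l)) ?_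
  have hplen : ((ciphertext.toList ++ List.replicate
      (((ciphertext.toList.length + size.toNat - 1) / size.toNat) * size.toNat
        - ciphertext.toList.length) 'X').toArray).size
      = ((ciphertext.toList.length + size.toNat - 1) / size.toNat) * size.toNat := by
    simp only [List.size_toArray, List.length_append, List.length_replicate]
    have := len_le_rows_mul ciphertext.toList.length size.toNat (by omega)
    omega
  rw [a_core, b_core _ ((ciphertext.toList.length + size.toNat - 1) / size.toNat)
      size.toNat (by omega) hplen]
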